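-- pv_equiv track=rewrite | github.com/sjbertolani/streamlit_apps | python_file_semantic_viewer/semantic_parser.py | _extract_sources_refs
-- ===== SOURCE A (Python) =====
-- from typing import Dict, Iterable, List, Optional, Tuple
--
-- def _extract_sources_refs(text: str) -> List[str]:
--     refs: List[str] = []
--     idx = 0
--     while True:
--         start = text.find("Sources.", idx)
--         if start == -1:
--             break
--         end = start + len("Sources.")
--         while end < len(text) and text[end] not in [",", ")"]:
--             end += 1
--         refs.append(text[start:end].strip())
--         idx = end
--     return refs
-- ===== SOURCE B (Python) =====
-- import re
--
-- def _extract_sources_refs(text: str):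
--     return [m.strip() for m in re.findall(r"Sources\.[^,)]*", text)]
-- ===== Notes on version B (the rewrite author's own statement) =====
-- stated objective: idiomatic
-- what changed: Replaces the hand-written outer find loop with its nested index/pointer scan by a single re.findall pass whose pattern matches the prefix marker followed by a greedy run of characters other than comma and closing parenthesis, stripping each match in a list comprehension.
import Mathlib
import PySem

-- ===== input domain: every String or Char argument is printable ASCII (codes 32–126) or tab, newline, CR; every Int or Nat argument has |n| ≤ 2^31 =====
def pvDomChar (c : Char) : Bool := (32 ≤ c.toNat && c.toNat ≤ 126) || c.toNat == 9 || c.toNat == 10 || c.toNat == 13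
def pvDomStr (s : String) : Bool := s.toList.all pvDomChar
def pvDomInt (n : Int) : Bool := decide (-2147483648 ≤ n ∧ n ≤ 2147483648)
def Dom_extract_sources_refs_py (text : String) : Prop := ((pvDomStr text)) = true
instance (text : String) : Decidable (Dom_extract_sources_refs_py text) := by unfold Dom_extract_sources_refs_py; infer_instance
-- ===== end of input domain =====

-- B replaces A's hand-written find/pointer loops by a single regex-findall pass
-- (ported here as a structural scan over the characters); objective: idiomatic, same cost.


-- the literal "Sources." as characters (shared constant)
def pvPat : List Char := "Sources.".toList

-- ===== PORT A =====

-- inner while loop: 'while end < len(text) and text[end] not in [",", ")"]: end += 1'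
def pvAInner (cs : List Char) (e : Nat) : Nat :=
  if h : e < cs.length then
    if cs[e] = ',' ∨ cs[e] = ')' then e else pvAInner cs (e + 1)
  else e
termination_by cs.length - e
decreasing_by omega

theorem pvAInner_ge (cs : List Char) (e : Nat) : e ≤ pvAInner cs e := by
  rw [pvAInner]
  split
  · split
    · exact le_refl _
    · exact le_trans (by omega) (pvAInner_ge cs (e + 1))
  · exact le_refl _
termination_by cs.length - e
decreasing_by omega

theorem pvAInner_le (cs : List Char) (e : Nat) (h : e ≤ cs.length) :
    pvAInner cs e ≤ cs.length := by
  rw [pvAInner]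
  split
  · split
    · exact h
    · exact pvAInner_le cs (e + 1) (by omega)
  · exact h
termination_by cs.length - e
decreasing_by omega

-- outer 'while True' loop of A; the invariant idx ≤ len is carried as a proof argument
-- (idx is 0 or a previous 'end', both ≤ len), needed only for termination.
def pvALoop (cs : List Char) (idx : Nat) (refs : List String) (h : idx ≤ cs.length) :
    List String :=
  let start := PySem.Chars.findFrom cs pvPat (idx : Int) none
  if hs : start = -1 then refs
  else
    have hspec := PySem.Chars.findFrom_natCast_spec cs pvPat idx h hs
    have h8 : start.toNat + 8 ≤ cs.length := by
      have hlen := hspec.2.1.length_le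
      rw [List.length_drop] at hlen
      have hp : pvPat.length = 8 := by decide
      omega
    let e := pvAInner cs (start.toNat + 8)
    pvALoop cs e
      (refs ++ [String.ofList (PySem.Chars.strip
        (PySem.List.slice cs (some start) (some (e : Int))))])
      (pvAInner_le cs (start.toNat + 8) h8)
termination_by cs.length + 1 - idx
decreasing_by
  have hspec' := PySem.Chars.findFrom_natCast_spec cs pvPat idx h hs
  have h1 := pvAInner_ge cs ((PySem.Chars.findFrom cs pvPat (idx : Int) none).toNat + 8)
  have h3 : pvAInner cs ((PySem.Chars.findFrom cs pvPat (idx : Int) none).toNat + 8) ≤ cs.length :=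
    pvAInner_le cs _ h8
  omega

def extract_sources_refs_py (text : String) : List String :=
  pvALoop text.toList 0 [] (by omega)

-- ===== PORT B =====

-- the character class [^,)]
def pvNotDelim (ch : Char) : Bool := ch ≠ ',' && ch ≠ ')'

-- hand-port of re.findall(r"Sources\.[^,)]*", text) for this fixed pattern (exact):
-- the engine tries a match at each position left to right; a match is the literal
-- "Sources." followed by the greedy run of non-',' non-')' characters; findall
-- resumes after the end of each match.  Source B strips each match as it lists it.
def pvBScan (cs : List Char) : List String :=
  match cs with
  | [] => []
  | c :: rest =>
    if PySem.Chars.startswith (c :: rest) pvPat then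
      let tail := (c :: rest).drop 8
      String.ofList (PySem.Chars.strip (pvPat ++ tail.takeWhile pvNotDelim))
        :: pvBScan (tail.dropWhile pvNotDelim)
    else pvBScan rest
termination_by cs.length
decreasing_by
  · have h1 : (List.dropWhile pvNotDelim ((c :: rest).drop 8)).length ≤ ((c :: rest).drop 8).length :=
      List.length_dropWhile_le _ _
    have h2 : ((c :: rest).drop 8).length = rest.length - 7 := by
      simp [List.drop_succ_cons]
    simp only [List.length_cons]
    omega
  · simp

def extract_sources_refs_py_alt (text : String) : List String :=
  pvBScan text.toList

-- ===== PRECONDITION & SPEC =====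
def Spec_extract_sources_refs_py (text : String) (out : List String) : Prop := out = extract_sources_refs_py_alt text
instance (text : String) (out : List String) : Decidable (Spec_extract_sources_refs_py text out) := by unfold Spec_extract_sources_refs_py; infer_instance

-- ===== CLAIM (what is proved, stated in full; the proofs are below) =====
def Claim_equal_extract_sources_refs_py : Prop := ∀ (text : String), Dom_extract_sources_refs_py text → Spec_extract_sources_refs_py text (extract_sources_refs_py text)

-- ===== LEMMAS AND PROOFS =====

-- A's inner while loop computes: start-of-scan plus the length of the greedy
-- non-delimiter run (B's takeWhile).
theorem pvAInner_eq (cs : List Char) (e : Nat) :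
    pvAInner cs e = e + ((cs.drop e).takeWhile pvNotDelim).length := by
  rw [pvAInner]
  split
  · rename_i hlt
    rw [List.drop_eq_getElem_cons hlt]
    split
    · rename_i hd
      have hf : pvNotDelim cs[e] = false := by
        rcases hd with hd | hd <;> simp [pvNotDelim, hd]
      simp [hf]
    · rename_i hd
      rw [not_or] at hd
      have hp : pvNotDelim cs[e] = true := by
        simp [pvNotDelim, hd.1, hd.2]
      rw [pvAInner_eq cs (e + 1), List.takeWhile_cons, hp]
      simp
      omega
  · rename_i hge
    rw [List.drop_eq_nil_of_le (by omega)]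
    simp
termination_by cs.length - e
decreasing_by omega

-- B's scan skips the positions before the first occurrence of the pattern.
theorem pvBScan_drop (k : Nat) : ∀ (cs : List Char),
    (∀ j, j < k → ¬ pvPat <+: cs.drop j) → pvBScan cs = pvBScan (cs.drop k) := by
  induction k with
  | zero => intro cs _; simp
  | succ k ih =>
    intro cs hcs
    match cs with
    | [] => simp
    | c :: rest =>
      have h0 : ¬ pvPat <+: (c :: rest) := by simpa using hcs 0 (by omega)
      have hsw : PySem.Chars.startswith (c :: rest) pvPat = false := by
        rw [← Bool.not_eq_true, PySem.Chars.startswith_iff]; exact h0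
      rw [pvBScan, hsw]
      simp only [Bool.false_eq_true, if_false, List.drop_succ_cons]
      exact ih rest (fun j hj => by simpa using hcs (j + 1) (by omega))

-- no occurrence at all: B's scan yields nothing.
theorem pvBScan_nil (cs : List Char) (h : ¬ pvPat <:+: cs) : pvBScan cs = [] := by
  match cs with
  | [] => rw [pvBScan]
  | c :: rest =>
    have h0 : ¬ pvPat <+: (c :: rest) := fun hp => h hp.isInfix
    have hsw : PySem.Chars.startswith (c :: rest) pvPat = false := by
      rw [← Bool.not_eq_true, PySem.Chars.startswith_iff]; exact h0
    rw [pvBScan, hsw]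
    simp only [Bool.false_eq_true, if_false]
    exact pvBScan_nil rest (fun hi => h (hi.trans (List.suffix_cons c rest).isInfix))
termination_by cs.length

-- a match at the head: B's scan emits the stripped match and resumes after it.
theorem pvBScan_match (cs : List Char) (h : pvPat <+: cs) :
    pvBScan cs =
      String.ofList (PySem.Chars.strip (pvPat ++ (cs.drop 8).takeWhile pvNotDelim))
        :: pvBScan ((cs.drop 8).dropWhile pvNotDelim) := by
  match cs with
  | [] =>
    exact absurd (List.prefix_nil.mp h) (by decide)
  | c :: rest =>
    have hsw : PySem.Chars.startswith (c :: rest) pvPat = true :=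
      (PySem.Chars.startswith_iff _ _).mpr h
    rw [pvBScan, hsw]
    simp

-- drop to the length of a takeWhile is dropWhile
theorem pv_drop_takeWhile (p : Char → Bool) (t : List Char) :
    t.drop (t.takeWhile p).length = t.dropWhile p := by
  rw [show t.drop (t.takeWhile p).length = (t.takeWhile p ++ t.dropWhile p).drop (t.takeWhile p).length
    from by rw [List.takeWhile_append_dropWhile]]
  exact List.drop_left

theorem pv_main_aux (n : Nat) : ∀ (cs : List Char) (idx : Nat) (h : idx ≤ cs.length)
    (refs : List String), cs.length - idx ≤ n →
    pvALoop cs idx refs h = refs ++ pvBScan (cs.drop idx) := by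
  induction n with
  | zero =>
    intro cs idx h refs hn
    have hidx : idx = cs.length := by omega
    have hdrop : cs.drop idx = [] := by rw [hidx]; simp
    have hnf : ¬ pvPat <:+: cs.drop idx := by
      rw [hdrop]; decide
    have hfind : PySem.Chars.findFrom cs pvPat (idx : Int) none = -1 :=
      (PySem.Chars.findFrom_natCast_eq_neg_one_iff cs pvPat idx h).mpr hnf
    rw [pvALoop, dif_pos hfind, pvBScan_nil _ hnf]
    simp
  | succ n ih =>
    intro cs idx h refs hn
    rw [pvALoop]
    by_cases hfind : PySem.Chars.findFrom cs pvPat (idx : Int) none = -1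
    · rw [dif_pos hfind]
      have hnf : ¬ pvPat <:+: cs.drop idx :=
        (PySem.Chars.findFrom_natCast_eq_neg_one_iff cs pvPat idx h).mp hfind
      rw [pvBScan_nil _ hnf]
      simp
    · rw [dif_neg hfind]
      have hspec := PySem.Chars.findFrom_natCast_spec cs pvPat idx h hfind
      set F := PySem.Chars.findFrom cs pvPat (idx : Int) none with hF
      have h0F : (0 : Int) ≤ F := le_trans (by exact_mod_cast Nat.zero_le idx) hspec.1
      set s := F.toNat with hs
      have hsidx : idx ≤ s := by
        have h1 := hspec.1
        omega
      have hpre : pvPat <+: cs.drop s := hspec.2.1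
      have h8 : s + 8 ≤ cs.length := by
        have hl := hpre.length_le
        rw [List.length_drop] at hl
        have hp : pvPat.length = 8 := by decide
        omega
      obtain ⟨t, ht⟩ := hpre
      have htdrop : cs.drop (s + 8) = t := by
        have h1 : (cs.drop s).drop 8 = t := by
          rw [← ht, List.drop_append_of_le_length (by decide)]
          simp [pvPat]
        rw [← List.drop_drop, h1]
      set k := (t.takeWhile pvNotDelim).length with hk
      have hE : pvAInner cs (s + 8) = s + 8 + k := by
        rw [pvAInner_eq, htdrop]
      have hslice : PySem.List.slice cs (some F) (some ((s + 8 + k : Nat) : Int))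
          = pvPat ++ t.takeWhile pvNotDelim := by
        rw [PySem.List.slice_toNat cs h0F (by exact_mod_cast Nat.zero_le _)]
        rw [show ((s + 8 + k : Nat) : Int).toNat = s + 8 + k from by omega, ← hs, ← ht]
        have hp8 : pvPat.length = 8 := by decide
        rw [show s + 8 + k - s = pvPat.length + k from by omega]
        rw [List.take_length_add_append k, hk,
          (List.prefix_iff_eq_take.mp (List.takeWhile_prefix pvNotDelim)).symm]
      have hB1 : pvBScan (cs.drop idx) = pvBScan (cs.drop s) := by
        have hno : ∀ j, j < s - idx → ¬ pvPat <+: (cs.drop idx).drop j := by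
          intro j hj
          rw [List.drop_drop]
          exact hspec.2.2 (idx + j) (by omega) (by omega)
        rw [pvBScan_drop (s - idx) (cs.drop idx) hno, List.drop_drop,
          show idx + (s - idx) = s from by omega]
      have hB2 : pvBScan (cs.drop s) =
          String.ofList (PySem.Chars.strip (pvPat ++ t.takeWhile pvNotDelim))
            :: pvBScan (t.dropWhile pvNotDelim) := by
        have hm := pvBScan_match (cs.drop s) ⟨t, ht⟩
        have hd : (cs.drop s).drop 8 = t := by rw [List.drop_drop]; exact htdrop
        rw [hm, hd]
      have hcse : cs.drop (s + 8 + k) = t.dropWhile pvNotDelim := by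
        rw [← List.drop_drop, htdrop, hk]
        exact pv_drop_takeWhile pvNotDelim t
      have hfuel : cs.length - (s + 8 + k) ≤ n := by omega
      have hlen : s + 8 + k ≤ cs.length := by
        have := pvAInner_le cs (s + 8) (by omega)
        omega
      refine Eq.trans (ih cs (pvAInner cs (s + 8)) (pvAInner_le cs (s + 8) (by omega))
        (refs ++ [String.ofList (PySem.Chars.strip (PySem.List.slice cs (some F)
          (some ((pvAInner cs (s + 8) : Nat) : Int))))]) (by rw [hE]; omega)) ?_
      rw [hE, hslice, hB1, hB2, hcse]
      simp

-- ===== VERDICT (by name: the statement is the Claim_ definition above) =====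
theorem extract_sources_refs_py_spec : Claim_equal_extract_sources_refs_py := by
  intro text _
  unfold Spec_extract_sources_refs_py extract_sources_refs_py extract_sources_refs_py_alt
  simpa using pv_main_aux (text.toList.length) text.toList 0 (by omega) [] (by omega)
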